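-- pv_equiv track=rewrite | github.com/sandyherho/dla-ideal-solver | src/dla_ideal/cli.py | normalize_scenario_name
-- ===== SOURCE A (Python) =====
-- def normalize_scenario_name(scenario_name: str) -> str:
--     """Convert scenario name to clean filename format."""
--     clean = scenario_name.lower()
--     clean = clean.replace(' - ', '_')
--     clean = clean.replace('-', '_')
--     clean = clean.replace(' ', '_')
--
--     while '__' in clean:
--         clean = clean.replace('__', '_')
--
--     clean = clean.rstrip('_')
--     return clean
-- ===== SOURCE B (Python) =====
-- def normalize_scenario_name(scenario_name: str) -> str:
--     """Convert scenario name to clean filename format (single-pass scan)."""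
--     out = []
--     for ch in scenario_name.lower():
--         if ch in '- _':
--             if not (out and out[-1] == '_'):
--                 out.append('_')
--         else:
--             out.append(ch)
--     return ''.join(out).rstrip('_')
-- ===== Notes on version B (the rewrite author's own statement) =====
-- stated objective: simpler
-- what changed: Replaces A's three-replace chain plus the while-loop that repeatedly rescans and collapses doubled underscores with a single stateful left-to-right scan that collapses separator runs as it emits characters.
import Mathlib
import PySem

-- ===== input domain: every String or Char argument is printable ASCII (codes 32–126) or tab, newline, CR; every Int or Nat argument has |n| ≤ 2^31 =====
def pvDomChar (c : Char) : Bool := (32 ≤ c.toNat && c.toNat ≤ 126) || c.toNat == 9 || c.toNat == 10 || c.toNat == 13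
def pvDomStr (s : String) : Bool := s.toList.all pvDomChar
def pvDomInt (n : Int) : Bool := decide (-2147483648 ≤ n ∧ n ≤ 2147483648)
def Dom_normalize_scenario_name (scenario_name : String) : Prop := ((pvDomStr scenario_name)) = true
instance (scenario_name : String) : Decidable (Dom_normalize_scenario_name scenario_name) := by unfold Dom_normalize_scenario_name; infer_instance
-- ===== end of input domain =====

-- B replaces A's replace-chain + while-loop fixpoint by a single stateful scan; objective: simpler (one pass), same observable behaviour.

-- ===== PORT A =====
-- pvRep is a fuel-free characterisation of PySem.Chars.replace (for a non-empty pattern),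
-- used only to justify termination of A's `while '__' in clean` loop and in the proofs below.
def pvRep (o : Char) (os new : List Char) : List Char → List Char
  | [] => []
  | c :: t =>
    if (o :: os).isPrefixOf (c :: t) then new ++ pvRep o os new (t.drop os.length)
    else c :: pvRep o os new t
termination_by l => l.length
decreasing_by
  · simp [List.length_drop]
  · simp

theorem pvGo_eq (o : Char) (os new : List Char) :
    ∀ (fuel : Nat) (l acc : List Char), l.length ≤ fuel →
      PySem.Chars.replace.go (o :: os) new fuel l acc = acc.reverse ++ pvRep o os new l := by
  intro fuel
  induction fuel with
  | zero =>
    intro l acc h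
    have hl : l = [] := by cases l <;> simp_all
    subst hl
    simp [PySem.Chars.replace.go, pvRep]
  | succ n ih =>
    intro l acc h
    cases l with
    | nil => simp [PySem.Chars.replace.go, pvRep]
    | cons c t =>
      rw [PySem.Chars.replace.go, pvRep]
      simp only [List.length_cons] at h
      by_cases hp : (o :: os).isPrefixOf (c :: t) = true
      · simp only [hp, if_true]
        rw [ih _ _ (by simp only [List.length_cons, List.length_drop]; omega)]
        simp [List.drop_succ_cons]
      · simp only [Bool.not_eq_true] at hp
        simp only [hp, Bool.false_eq_true, if_false]
        rw [ih _ _ (by omega)]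
        simp

theorem pvReplace_eq (o : Char) (os new s : List Char) :
    PySem.Chars.replace s (o :: os) new = pvRep o os new s := by
  simp only [PySem.Chars.replace, List.isEmpty_cons, Bool.false_eq_true, if_false]
  have := pvGo_eq o os new s.length s [] le_rfl
  simpa using this

theorem pvRep_dd_le : ∀ (n : Nat) (m : List Char), m.length ≤ n →
    (pvRep '_' ['_'] ['_'] m).length ≤ m.length := by
  intro n
  induction n with
  | zero => intro m h; have : m = [] := by cases m <;> simp_all
            subst this; simp [pvRep]
  | succ n ih =>
    intro m h
    cases m with
    | nil => simp [pvRep]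
    | cons c t =>
      rw [pvRep]
      simp only [List.length_cons] at h
      by_cases hp : (('_' : Char) :: ['_']).isPrefixOf (c :: t) = true
      · cases t with
        | nil => simp [List.isPrefixOf] at hp
        | cons d t' =>
          simp only [List.isPrefixOf, Bool.and_eq_true, beq_iff_eq] at hp
          obtain ⟨hc, hd, -⟩ := hp
          subst hc; subst hd
          rw [if_pos (by simp [List.isPrefixOf])]
          have := ih t' (by simp only [List.length_cons] at h; omega)
          simp only [List.length_cons, List.length_nil, List.drop_succ_cons, List.drop_zero,
            List.length_append] at *
          omega
      · simp only [Bool.not_eq_true] at hp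
        simp only [hp, Bool.false_eq_true, if_false]
        have := ih t (by omega)
        simp only [List.length_cons]
        omega

theorem pvRep_dd_lt : ∀ (n : Nat) (m : List Char), m.length ≤ n →
    (['_', '_'] : List Char) <:+: m → (pvRep '_' ['_'] ['_'] m).length < m.length := by
  intro n
  induction n with
  | zero =>
    intro m h hinf
    have : m = [] := by cases m <;> simp_all
    subst this
    simp [List.infix_nil] at hinf
  | succ n ih =>
    intro m h hinf
    cases m with
    | nil => simp [List.infix_nil] at hinf
    | cons c t =>
      rw [pvRep]
      simp only [List.length_cons] at h
      by_cases hp : (('_' : Char) :: ['_']).isPrefixOf (c :: t) = true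
      · cases t with
        | nil => simp [List.isPrefixOf] at hp
        | cons d t' =>
          simp only [List.isPrefixOf, Bool.and_eq_true, beq_iff_eq] at hp
          obtain ⟨hc, hd, -⟩ := hp
          subst hc; subst hd
          rw [if_pos (by simp [List.isPrefixOf])]
          have := pvRep_dd_le t'.length t' le_rfl
          simp only [List.length_cons, List.length_nil, List.drop_succ_cons, List.drop_zero,
            List.length_append] at *
          omega
      · have ht : (['_', '_'] : List Char) <:+: t := by
          rcases List.infix_cons_iff.1 hinf with hpre | ht
          · exact absurd (List.isPrefixOf_iff_prefix.2 hpre) (by simpa using hp)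
          · exact ht
        simp only [Bool.not_eq_true] at hp
        simp only [hp, Bool.false_eq_true, if_false]
        have := ih t (by omega) ht
        simp only [List.length_cons]
        omega

-- while '__' in clean: clean = clean.replace('__', '_')
def pvLoopA (l : List Char) : List Char :=
  if h : PySem.Chars.isIn ['_', '_'] l = true then
    pvLoopA (PySem.Chars.replace l ['_', '_'] ['_'])
  else l
termination_by l.length
decreasing_by
  rw [pvReplace_eq]
  exact pvRep_dd_lt l.length l le_rfl ((PySem.Chars.isIn_iff_infix _ _).1 h)

def normalize_scenario_name (scenario_name : String) : String :=
  let c1 := PySem.Str.lower scenario_name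
  let c2 := PySem.Str.replace c1 " - " "_"
  let c3 := PySem.Str.replace c2 "-" "_"
  let c4 := PySem.Str.replace c3 " " "_"
  let c5 := pvLoopA c4.toList
  -- clean.rstrip('_'): hand port (PySem has no rstrip-with-chars); exact: drop trailing '_'
  String.ofList ((c5.reverse.dropWhile (fun c => c == '_')).reverse)

-- ===== PORT B =====
def pvSep (c : Char) : Bool := c == '-' || c == ' ' || c == '_'

-- one step of B's scan; `acc` holds the output so far, reversed (Python append = cons here)
def pvStep (acc : List Char) (ch : Char) : List Char :=
  if pvSep ch then (if acc.head? == some '_' then acc else '_' :: acc) else ch :: acc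

def normalize_scenario_name_alt (scenario_name : String) : String :=
  let out := (PySem.Str.lower scenario_name).toList.foldl pvStep []
  -- ''.join(out).rstrip('_'): out is reversed, so strip leading '_' then reverse
  String.ofList ((out.dropWhile (fun c => c == '_')).reverse)

-- ===== PRECONDITION & SPEC =====
def Spec_normalize_scenario_name (scenario_name : String) (out : String) : Prop := out = normalize_scenario_name_alt scenario_name
instance (scenario_name : String) (out : String) : Decidable (Spec_normalize_scenario_name scenario_name out) := by unfold Spec_normalize_scenario_name; infer_instance

-- ===== CLAIM (what is proved, stated in full; the proofs are below) =====
def Claim_equal_normalize_scenario_name : Prop := ∀ (scenario_name : String), Dom_normalize_scenario_name scenario_name → Spec_normalize_scenario_name scenario_name (normalize_scenario_name scenario_name)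

-- ===== LEMMAS AND PROOFS =====

-- scan form of B's fold (state = "last emitted char was '_'")
def pvScan : Bool → List Char → List Char
  | _, [] => []
  | u, c :: t =>
    if pvSep c then (if u then pvScan true t else '_' :: pvScan true t)
    else c :: pvScan false t

-- the combined effect of A's two single-character replaces
def pvSubst (c : Char) : Char := if c == '-' || c == ' ' then '_' else c

theorem pvFoldl_eq_scan : ∀ (l acc : List Char),
    l.foldl pvStep acc = (pvScan (acc.head? == some '_') l).reverse ++ acc := by
  intro l
  induction l with
  | nil => intro acc; simp [pvScan]
  | cons c t ih =>
    intro acc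
    rw [List.foldl_cons, ih]
    cases hc : pvSep c with
    | true =>
      cases hu : (acc.head? == some '_') with
      | true =>
        have : pvStep acc c = acc := by simp [pvStep, hc, hu]
        rw [this, hu]
        simp [pvScan, hc]
      | false =>
        have : pvStep acc c = '_' :: acc := by simp [pvStep, hc, hu]
        rw [this]
        simp [pvScan, hc]
    | false =>
      have hne : (c == '_') = false := by
        simp [pvSep] at hc; simp [hc]
      have : pvStep acc c = c :: acc := by simp [pvStep, hc]
      rw [this]
      simp [pvScan, hc, hne]

theorem pvRep_single (a : Char) : ∀ (l : List Char),
    pvRep a [] ['_'] l = l.map (fun c => if a == c then '_' else c) := by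
  intro l
  induction l with
  | nil => simp [pvRep]
  | cons c t ih =>
    rw [pvRep]
    by_cases h : a = c
    · subst h
      rw [if_pos (by simp [List.isPrefixOf])]
      simp [ih]
    · rw [if_neg (by simp [List.isPrefixOf, h])]
      simp [ih, h]

theorem pvMap_comp_subst : ∀ (l : List Char),
    (l.map (fun c => if ('-' : Char) == c then '_' else c)).map
      (fun c => if (' ' : Char) == c then '_' else c) = l.map pvSubst := by
  intro l
  rw [List.map_map]
  apply List.map_congr_left
  intro c _
  by_cases h1 : c = '-'
  · subst h1; simp [pvSubst]
  · by_cases h2 : c = ' '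
    · subst h2; simp [pvSubst]
    · simp [pvSubst, Function.comp, h1, h2, Ne.symm h1, Ne.symm h2]

theorem pvScan_map_subst : ∀ (l : List Char) (u : Bool),
    pvScan u (l.map pvSubst) = pvScan u l := by
  intro l
  induction l with
  | nil => intro u; simp
  | cons c t ih =>
    intro u
    by_cases h : (c == '-' || c == ' ') = true
    · have h1 : pvSubst c = '_' := by simp [pvSubst, h]
      have h2 : pvSep c = true := by
        simp [pvSep]; rcases Bool.or_eq_true_iff.1 h with h | h <;> simp_all
      simp only [List.map_cons, h1]
      rw [show pvScan u ('_' :: List.map pvSubst t)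
            = if u then pvScan true (List.map pvSubst t)
              else '_' :: pvScan true (List.map pvSubst t) from by simp [pvScan, pvSep]]
      rw [show pvScan u (c :: t) = if u then pvScan true t else '_' :: pvScan true t from by
            simp [pvScan, h2]]
      cases u <;> simp [ih]
    · have h1 : pvSubst c = c := by simp [pvSubst, h]
      simp only [List.map_cons, h1]
      simp [pvScan, ih]

theorem pvScan_rep3 : ∀ (n : Nat) (l : List Char), l.length ≤ n → ∀ (u : Bool),
    pvScan u (pvRep ' ' ['-', ' '] ['_'] l) = pvScan u l := by
  intro n
  induction n with
  | zero =>
    intro l h u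
    have : l = [] := by cases l <;> simp_all
    subst this; simp [pvRep]
  | succ n ih =>
    intro l h u
    cases l with
    | nil => simp [pvRep]
    | cons c t =>
      rw [pvRep]
      simp only [List.length_cons] at h
      by_cases hp : ((' ' : Char) :: ['-', ' ']).isPrefixOf (c :: t) = true
      · cases t with
        | nil => simp [List.isPrefixOf] at hp
        | cons d t1 =>
          cases t1 with
          | nil => simp [List.isPrefixOf] at hp
          | cons e t2 =>
            simp only [List.isPrefixOf, Bool.and_eq_true, beq_iff_eq] at hp
            obtain ⟨hc, hd, he, -⟩ := hp
            subst hc; subst hd; subst he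
            rw [if_pos (by simp [List.isPrefixOf])]
            have ht2 : t2.length ≤ n := by simp only [List.length_cons] at h; omega
            simp only [List.length_cons, List.length_nil, List.drop_succ_cons, List.drop_zero]
            have hsp : pvSep ' ' = true := by decide
            have hda : pvSep '-' = true := by decide
            have hus : pvSep '_' = true := by decide
            cases u <;> simp [pvScan, hsp, hda, hus, ih t2 ht2]
      · simp only [Bool.not_eq_true] at hp
        simp only [hp, Bool.false_eq_true, if_false]
        have ht : t.length ≤ n := by omega
        cases hc : pvSep c <;> cases u <;> simp [pvScan, hc, ih t ht]

theorem pvScan_repDD : ∀ (n : Nat) (m : List Char), m.length ≤ n → ∀ (u : Bool),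
    pvScan u (pvRep '_' ['_'] ['_'] m) = pvScan u m := by
  intro n
  induction n with
  | zero =>
    intro m h u
    have : m = [] := by cases m <;> simp_all
    subst this; simp [pvRep]
  | succ n ih =>
    intro m h u
    cases m with
    | nil => simp [pvRep]
    | cons c t =>
      rw [pvRep]
      simp only [List.length_cons] at h
      by_cases hp : (('_' : Char) :: ['_']).isPrefixOf (c :: t) = true
      · cases t with
        | nil => simp [List.isPrefixOf] at hp
        | cons d t1 =>
          simp only [List.isPrefixOf, Bool.and_eq_true, beq_iff_eq] at hp
          obtain ⟨hc, hd, -⟩ := hp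
          subst hc; subst hd
          rw [if_pos (by simp [List.isPrefixOf])]
          have ht1 : t1.length ≤ n := by simp only [List.length_cons] at h; omega
          have hus : pvSep '_' = true := by decide
          simp only [List.length_cons, List.length_nil, List.drop_succ_cons, List.drop_zero]
          cases u <;> simp [pvScan, hus, ih t1 ht1]
      · simp only [Bool.not_eq_true] at hp
        simp only [hp, Bool.false_eq_true, if_false]
        have ht : t.length ≤ n := by omega
        cases hc : pvSep c <;> cases u <;> simp [pvScan, hc, ih t ht]

def pvNoDash (m : List Char) : Prop := ∀ c ∈ m, c ≠ '-' ∧ c ≠ ' '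

theorem pvRep_dd_noDash : ∀ (n : Nat) (m : List Char), m.length ≤ n →
    pvNoDash m → pvNoDash (pvRep '_' ['_'] ['_'] m) := by
  intro n
  induction n with
  | zero =>
    intro m h hm
    have : m = [] := by cases m <;> simp_all
    subst this; simpa [pvRep] using hm
  | succ n ih =>
    intro m h hm
    cases m with
    | nil => simpa [pvRep] using hm
    | cons c t =>
      rw [pvRep]
      simp only [List.length_cons] at h
      by_cases hp : (('_' : Char) :: ['_']).isPrefixOf (c :: t) = true
      · cases t with
        | nil => simp [List.isPrefixOf] at hp
        | cons d t1 =>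
          simp only [List.isPrefixOf, Bool.and_eq_true, beq_iff_eq] at hp
          obtain ⟨hc, hd, -⟩ := hp
          subst hc; subst hd
          rw [if_pos (by simp [List.isPrefixOf])]
          simp only [List.length_cons, List.length_nil, List.drop_succ_cons, List.drop_zero]
          intro x hx
          rcases List.mem_cons.1 hx with hx | hx
          · subst hx; decide
          · exact ih t1 (by simp only [List.length_cons] at h; omega)
              (fun y hy => hm y (by simp [hy])) x hx
      · simp only [Bool.not_eq_true] at hp
        simp only [hp, Bool.false_eq_true, if_false]
        intro x hx
        rcases List.mem_cons.1 hx with hx | hx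
        · exact hm x (by simp [hx])
        · exact ih t (by omega) (fun y hy => hm y (by simp [hy])) x hx

theorem pvScan_id : ∀ (m : List Char), pvNoDash m → ¬ (['_', '_'] : List Char) <:+: m →
    ∀ (u : Bool), (u = true → m.head? ≠ some '_') → pvScan u m = m := by
  intro m
  induction m with
  | nil => intro _ _ u _; simp [pvScan]
  | cons c t ih =>
    intro hnd hinf u hu
    have hc := hnd c (by simp)
    by_cases hcu : c = '_'
    · subst hcu
      have hu0 : u = false := by
        cases u
        · rfl
        · exact absurd (show (('_' :: t) : List Char).head? = some '_' from rfl) (hu rfl)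
      subst hu0
      have hth : t.head? ≠ some '_' := by
        intro hh
        cases t with
        | nil => simp at hh
        | cons d t1 =>
          simp at hh
          subst hh
          exact hinf (List.IsPrefix.isInfix ⟨t1, rfl⟩)
      have hndt : pvNoDash t := fun y hy => hnd y (by simp [hy])
      have hinft : ¬ (['_', '_'] : List Char) <:+: t := fun h => hinf (List.infix_cons h)
      simp [pvScan, pvSep, ih hndt hinft true (fun _ => hth)]
    · have hsep : pvSep c = false := by
        simp [pvSep, hcu, hc.1, hc.2]
      have hndt : pvNoDash t := fun y hy => hnd y (by simp [hy])
      have hinft : ¬ (['_', '_'] : List Char) <:+: t := fun h => hinf (List.infix_cons h)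
      simp [pvScan, hsep, ih hndt hinft false (by simp)]

theorem pvLoopA_eq_scan : ∀ (n : Nat) (m : List Char), m.length ≤ n →
    pvNoDash m → pvLoopA m = pvScan false m := by
  intro n
  induction n with
  | zero =>
    intro m h hm
    have : m = [] := by cases m <;> simp_all
    subst this
    rw [pvLoopA, dif_neg (by decide)]
    simp [pvScan]
  | succ n ih =>
    intro m h hm
    rw [pvLoopA]
    by_cases hin : PySem.Chars.isIn ['_', '_'] m = true
    · rw [dif_pos hin]
      have hinf := (PySem.Chars.isIn_iff_infix _ _).1 hin
      have hlt := pvRep_dd_lt m.length m le_rfl hinf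
      rw [pvReplace_eq]
      rw [ih _ (by omega) (pvRep_dd_noDash m.length m le_rfl hm)]
      exact pvScan_repDD m.length m le_rfl false
    · rw [dif_neg hin]
      have hinf := (PySem.Chars.isIn_eq_false_iff _ _).1 (by simpa using hin)
      exact (pvScan_id m hm hinf false (by simp)).symm

theorem pvNoDash_map_subst (l : List Char) : pvNoDash (l.map pvSubst) := by
  intro c hc
  simp only [List.mem_map] at hc
  obtain ⟨a, -, ha⟩ := hc
  subst ha
  by_cases h : (a == '-' || a == ' ') = true
  · simp [pvSubst, h]
  · simp only [Bool.or_eq_true, beq_iff_eq] at h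
    push Not at h
    simp [pvSubst, h.1, h.2]


-- ===== VERDICT (by name: the statement is the Claim_ definition above) =====
theorem normalize_scenario_name_spec : Claim_equal_normalize_scenario_name := by
  intro s _
  unfold Spec_normalize_scenario_name normalize_scenario_name normalize_scenario_name_alt
  simp only [PySem.Str.toList_replace, PySem.Str.toList_lower]
  have h3 : (" - " : String).toList = [' ', '-', ' '] := rfl
  have h1 : ("-" : String).toList = ['-'] := rfl
  have h2 : (" " : String).toList = [' '] := rfl
  have hu : ("_" : String).toList = ['_'] := rfl
  rw [h3, h1, h2, hu]
  set L := PySem.Chars.lower s.toList with hL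
  rw [show ([' ', '-', ' '] : List Char) = ' ' :: ['-', ' '] from rfl,
      show (['-'] : List Char) = '-' :: [] from rfl,
      show ([' '] : List Char) = ' ' :: [] from rfl,
      pvReplace_eq, pvReplace_eq, pvReplace_eq, pvRep_single, pvRep_single]
  set X := pvRep ' ' ['-', ' '] ['_'] L with hX
  rw [pvMap_comp_subst]
  rw [pvLoopA_eq_scan (X.map pvSubst).length _ le_rfl (pvNoDash_map_subst X)]
  rw [pvScan_map_subst, hX, pvScan_rep3 L.length L le_rfl]
  rw [pvFoldl_eq_scan]
  simp
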